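-- pv_equiv track=rewrite | github.com/namhn89/algorithm | leetcode/weekly-contest-134/d_sol.py | isEscapePossible
-- ===== SOURCE A (Python) =====
-- def isEscapePossible(blocked, source, target):
--     """
--     :type blocked: List[List[int]]
--     :type source: List[int]
--     :type target: List[int]
--     :rtype: bool
--     """
--     blocked = set([(x[0], x[1]) for x in blocked])
--     dir = [(-1, 0), (1, 0), (0, 1), (0, -1)]
--
--     def gen_neighbor(x, y):
--         for dx, dy in dir:
--             if x + dx < 0 or x + dx > 1e6 or y + dy < 0 or y + dy > 1e6:
--                 continue
--             nx, ny = x + dx, y + dy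
--             yield nx, ny
--
--     def is_in_box(x, y, center_x, center_y, length):
--         return center_x - length <= x <= center_x + length and \
--             center_y - length <= y <= center_y + length
--
--
--     def is_blocked(start_x, start_y, end_x, end_y):
--         seen = set()
--         stack = [(start_x, start_y)]
--         seen.add((start_x, start_y))
--         while stack:
--             x, y = stack.pop(-1)
--             if not is_in_box(x, y, start_x, start_y, len(blocked)) or \
--                     (x == end_x and y == end_y):
--                 return True
--
--             for nx, ny in gen_neighbor(x, y):
--                 if (nx, ny) in blocked or (nx, ny) in seen: continue
--                 seen.add((nx, ny))
--                 stack.append((nx, ny))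
--         return False
--
--     return is_blocked(source[0], source[1], target[0], target[1]) and \
--            is_blocked(target[0], target[1], source[0], source[1])
-- ===== SOURCE B (Python) =====
-- def isEscapePossible(blocked, source, target):
--     blocks = set()
--     for b in blocked:
--         blocks.add((b[0], b[1]))
--     r = len(blocks)
--
--     def escapes(sx, sy, ex, ey):
--         seen = {(sx, sy)}
--         queue = [(sx, sy)]
--         while queue:
--             x, y = queue.pop(0)
--             if x < sx - r or x > sx + r or y < sy - r or y > sy + r or (x == ex and y == ey):
--                 return True
--             for nx, ny in ((x - 1, y), (x + 1, y), (x, y + 1), (x, y - 1)):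
--                 if 0 <= nx <= 10 ** 6 and 0 <= ny <= 10 ** 6 and (nx, ny) not in blocks and (nx, ny) not in seen:
--                     seen.add((nx, ny))
--                     queue.append((nx, ny))
--         return False
--
--     return escapes(source[0], source[1], target[0], target[1]) and \
--         escapes(target[0], target[1], source[0], source[1])
-- ===== Notes on version B (the rewrite author's own statement) =====
-- stated objective: alternative
-- what changed: Replaces A's depth-first flood fill (explicit stack popped from the back, a generator for neighbours and an is_in_box helper) by a breadth-first flood fill (FIFO queue, inlined bound and box tests); same confinement criterion, same return value, different traversal order.
import Mathlib
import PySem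

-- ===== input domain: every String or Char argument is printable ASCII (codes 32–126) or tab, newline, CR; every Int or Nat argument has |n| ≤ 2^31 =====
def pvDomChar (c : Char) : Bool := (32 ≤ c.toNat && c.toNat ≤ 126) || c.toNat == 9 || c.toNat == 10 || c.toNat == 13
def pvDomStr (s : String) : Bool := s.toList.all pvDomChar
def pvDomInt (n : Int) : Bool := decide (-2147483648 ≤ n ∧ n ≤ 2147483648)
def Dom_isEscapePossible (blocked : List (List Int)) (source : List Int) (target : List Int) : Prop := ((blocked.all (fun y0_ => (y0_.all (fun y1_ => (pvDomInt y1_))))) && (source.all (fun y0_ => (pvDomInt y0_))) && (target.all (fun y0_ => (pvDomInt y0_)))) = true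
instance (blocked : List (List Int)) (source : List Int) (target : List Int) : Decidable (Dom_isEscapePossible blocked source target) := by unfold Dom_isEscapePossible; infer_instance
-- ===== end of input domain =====

-- B replaces A's depth-first flood fill (stack popped from the back, generator neighbours,
-- is_in_box helper) by a breadth-first flood fill (FIFO queue, inlined tests); same criterion,
-- same return value.

-- ===== PORT A =====

-- is_in_box helper of A
def egInBox (x y cx cy len : Int) : Bool :=
  (decide (cx - len ≤ x) && decide (x ≤ cx + len)) &&
    (decide (cy - len ≤ y) && decide (y ≤ cy + len))

-- gen_neighbor of A (the generator, materialised as the list it yields, in yield order)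
def egNbrs (x y : Int) : List (Int × Int) :=
  ([(-1, 0), (1, 0), (0, 1), (0, -1)] : List (Int × Int)).foldl
    (fun acc d =>
      if x + d.1 < 0 ∨ x + d.1 > 1000000 ∨ y + d.2 < 0 ∨ y + d.2 > 1000000 then acc
      else acc ++ [(x + d.1, y + d.2)]) []

-- the while-loop of A's is_blocked; fuel bounds the iteration count (proved sufficient below)
def egLoopA (blk : PySem.Set (Int × Int)) (L sx sy ex ey : Int) :
    Nat → PySem.Set (Int × Int) → List (Int × Int) → Bool
  | 0, _, _ => false
  | fuel + 1, seen, stack =>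
    match stack.getLast? with  -- stack.pop(-1)
    | none => false
    | some (x, y) =>
      if !(egInBox x y sx sy L) || (x == ex && y == ey) then true
      else
        egLoopA blk L sx sy ex ey fuel
          ((egNbrs x y).foldl
            (fun (st : PySem.Set (Int × Int) × List (Int × Int)) n =>
              if PySem.Set.contains blk n || PySem.Set.contains st.1 n then st
              else (PySem.Set.add st.1 n, st.2 ++ [n])) (seen, stack.dropLast)).1
          ((egNbrs x y).foldl
            (fun (st : PySem.Set (Int × Int) × List (Int × Int)) n =>
              if PySem.Set.contains blk n || PySem.Set.contains st.1 n then st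
              else (PySem.Set.add st.1 n, st.2 ++ [n])) (seen, stack.dropLast)).2

-- enough fuel for the loop: the DFS visits only cells of a (2L+3)-sided box (proved below)
def egFuelA (L : Int) : Nat := 5 * (2 * L.toNat + 3) ^ 2 + 5

def egIsBlockedA (blk : PySem.Set (Int × Int)) (L sx sy ex ey : Int) : Bool :=
  egLoopA blk L sx sy ex ey (egFuelA L)
    (PySem.Set.add PySem.Set.empty (sx, sy)) [(sx, sy)]

def isEscapePossible (blocked : List (List Int)) (source : List Int) (target : List Int) : Bool :=
  let blk : PySem.Set (Int × Int) :=
    PySem.Set.ofList (blocked.map (fun x => (PySem.List.pyGetD x 0 0, PySem.List.pyGetD x 1 0)))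
  let L : Int := (blk.length : Int)
  let sx := PySem.List.pyGetD source 0 0
  let sy := PySem.List.pyGetD source 1 0
  let ex := PySem.List.pyGetD target 0 0
  let ey := PySem.List.pyGetD target 1 0
  egIsBlockedA blk L sx sy ex ey && egIsBlockedA blk L ex ey sx sy

-- ===== PORT B =====

-- 0 <= nx <= 10**6 and 0 <= ny <= 10**6
def egGrid (n : Int × Int) : Bool :=
  (decide (0 ≤ n.1) && decide (n.1 ≤ 1000000)) && (decide (0 ≤ n.2) && decide (n.2 ≤ 1000000))

-- the while-loop of B's escapes: FIFO queue popped at the front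
def egLoopB (blk : PySem.Set (Int × Int)) (r sx sy ex ey : Int) :
    Nat → PySem.Set (Int × Int) → List (Int × Int) → Bool
  | 0, _, _ => false
  | fuel + 1, seen, queue =>
    match queue with  -- queue.pop(0)
    | [] => false
    | (x, y) :: rest =>
      if decide (x < sx - r) || decide (x > sx + r) || decide (y < sy - r) ||
          decide (y > sy + r) || (x == ex && y == ey) then true
      else
        egLoopB blk r sx sy ex ey fuel
          (([(x - 1, y), (x + 1, y), (x, y + 1), (x, y - 1)] : List (Int × Int)).foldl
            (fun (st : PySem.Set (Int × Int) × List (Int × Int)) n =>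
              if egGrid n && !(PySem.Set.contains blk n) && !(PySem.Set.contains st.1 n)
              then (PySem.Set.add st.1 n, st.2 ++ [n]) else st) (seen, rest)).1
          (([(x - 1, y), (x + 1, y), (x, y + 1), (x, y - 1)] : List (Int × Int)).foldl
            (fun (st : PySem.Set (Int × Int) × List (Int × Int)) n =>
              if egGrid n && !(PySem.Set.contains blk n) && !(PySem.Set.contains st.1 n)
              then (PySem.Set.add st.1 n, st.2 ++ [n]) else st) (seen, rest)).2

def egFuelB (r : Int) : Nat := 5 * (2 * r.toNat + 3) ^ 2 + 5

def egEscapesB (blk : PySem.Set (Int × Int)) (r sx sy ex ey : Int) : Bool :=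
  egLoopB blk r sx sy ex ey (egFuelB r) (PySem.Set.ofList [(sx, sy)]) [(sx, sy)]

def isEscapePossible_alt (blocked : List (List Int)) (source : List Int) (target : List Int) : Bool :=
  let blk : PySem.Set (Int × Int) := blocked.foldl
    (fun (s : PySem.Set (Int × Int)) b =>
      PySem.Set.add s (PySem.List.pyGetD b 0 0, PySem.List.pyGetD b 1 0)) PySem.Set.empty
  let r : Int := (blk.length : Int)
  egEscapesB blk r (PySem.List.pyGetD source 0 0) (PySem.List.pyGetD source 1 0)
      (PySem.List.pyGetD target 0 0) (PySem.List.pyGetD target 1 0) &&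
    egEscapesB blk r (PySem.List.pyGetD target 0 0) (PySem.List.pyGetD target 1 0)
      (PySem.List.pyGetD source 0 0) (PySem.List.pyGetD source 1 0)

-- ===== PRECONDITION & SPEC =====

-- Pre_ excludes exactly the inputs where Python A raises IndexError: a blocked entry, the
-- source or the target with fewer than two coordinates (B raises there as well).
def Pre_isEscapePossible (blocked : List (List Int)) (source : List Int) (target : List Int) : Prop :=
  (∀ b ∈ blocked, 2 ≤ b.length) ∧ 2 ≤ source.length ∧ 2 ≤ target.length
instance (blocked : List (List Int)) (source : List Int) (target : List Int) : Decidable (Pre_isEscapePossible blocked source target) := by unfold Pre_isEscapePossible; infer_instance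

def pvWitness_isEscapePossible : List (List Int) × List Int × List Int :=
  ([[0, 1], [1, 0]], ([0, 0], [3, 3]))

def Spec_isEscapePossible (blocked : List (List Int)) (source : List Int) (target : List Int) (out : Bool) : Prop := out = isEscapePossible_alt blocked source target
instance (blocked : List (List Int)) (source : List Int) (target : List Int) (out : Bool) : Decidable (Spec_isEscapePossible blocked source target out) := by unfold Spec_isEscapePossible; infer_instance

-- ===== CLAIM (what is proved, stated in full; the proofs are below) =====
def Claim_equal_isEscapePossible : Prop := ∀ (blocked : List (List Int)) (source : List Int) (target : List Int), Dom_isEscapePossible blocked source target → Pre_isEscapePossible blocked source target → Spec_isEscapePossible blocked source target (isEscapePossible blocked source target)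

-- ===== LEMMAS AND PROOFS =====

-- canonical pieces shared by the two correctness arguments

def egDirs (c : Int × Int) : List (Int × Int) :=
  [(c.1 - 1, c.2), (c.1 + 1, c.2), (c.1, c.2 + 1), (c.1, c.2 - 1)]

def egBad (L sx sy ex ey : Int) (c : Int × Int) : Bool :=
  !(egInBox c.1 c.2 sx sy L) || (c.1 == ex && c.2 == ey)

def egOK (blk seen : List (Int × Int)) (n : Int × Int) : Bool :=
  egGrid n && !(PySem.Set.contains blk n) && !(PySem.Set.contains seen n)

def egNews (blk seen : List (Int × Int)) (c : Int × Int) : List (Int × Int) :=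
  (egDirs c).filter (egOK blk seen)

def egPopLast (l : List (Int × Int)) : Option ((Int × Int) × List (Int × Int)) :=
  l.getLast?.map (fun c => (c, l.dropLast))

def egPopHead : List (Int × Int) → Option ((Int × Int) × List (Int × Int))
  | [] => none
  | c :: rest => some (c, rest)

-- the common skeleton both loops instantiate (pop side is the only difference)
def egGen (pop : List (Int × Int) → Option ((Int × Int) × List (Int × Int)))
    (blk : List (Int × Int)) (L sx sy ex ey : Int) :
    Nat → List (Int × Int) → List (Int × Int) → Bool
  | 0, _, _ => false
  | fuel + 1, seen, work =>
    match pop work with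
    | none => false
    | some (c, rest) =>
      if egBad L sx sy ex ey c then true
      else egGen pop blk L sx sy ex ey fuel
        (seen ++ egNews blk seen c) (rest ++ egNews blk seen c)

-- cells the flood fill can classify as reachable (expansion only from non-bad cells)
inductive EgReach (blk : List (Int × Int)) (L sx sy ex ey : Int) : Int × Int → Prop
  | start : EgReach blk L sx sy ex ey (sx, sy)
  | step (c n : Int × Int) : EgReach blk L sx sy ex ey c → egBad L sx sy ex ey c = false →
      n ∈ egDirs c → egGrid n = true → n ∉ blk → EgReach blk L sx sy ex ey n

noncomputable def egBox (L sx sy : Int) : Finset (Int × Int) :=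
  Finset.Icc (sx - (L + 1)) (sx + (L + 1)) ×ˢ Finset.Icc (sy - (L + 1)) (sy + (L + 1))

def EgInv (blk : List (Int × Int)) (L sx sy ex ey : Int) (seen work : List (Int × Int)) : Prop :=
  seen.Nodup ∧
  (∀ c ∈ work, c ∈ seen) ∧
  (∀ c ∈ seen, EgReach blk L sx sy ex ey c) ∧
  (∀ c ∈ seen, c ∉ work → egBad L sx sy ex ey c = false ∧
    ∀ n ∈ egDirs c, egGrid n = true → n ∉ blk → n ∈ seen) ∧
  (sx, sy) ∈ seen ∧
  (∀ c ∈ seen, c ∈ egBox L sx sy)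

noncomputable def egMeasure (L sx sy : Int) (seen work : List (Int × Int)) : Nat :=
  1 + work.length + 5 * ((egBox L sx sy).card - seen.length)

theorem egDirs_nodup (c : Int × Int) : (egDirs c).Nodup := by
  simp [egDirs, Prod.ext_iff]
  omega

theorem egMem_news (blk seen : List (Int × Int)) (c n : Int × Int) :
    n ∈ egNews blk seen c ↔
      n ∈ egDirs c ∧ egGrid n = true ∧ n ∉ blk ∧ n ∉ seen := by
  simp [egNews, egOK, List.mem_filter, and_assoc]

theorem egNews_nodup (blk seen : List (Int × Int)) (c : Int × Int) :
    (egNews blk seen c).Nodup := (egDirs_nodup c).filter _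

-- A's neighbour generator is the canonical direction list filtered by the grid bounds
theorem egNbrs_eq (x y : Int) : egNbrs x y = (egDirs (x, y)).filter egGrid := by
  have h : ∀ (acc : List (Int × Int)) (d : Int × Int),
      (if x + d.1 < 0 ∨ x + d.1 > 1000000 ∨ y + d.2 < 0 ∨ y + d.2 > 1000000 then acc
       else acc ++ [(x + d.1, y + d.2)]) =
      (if egGrid (x + d.1, y + d.2) then acc ++ [(x + d.1, y + d.2)] else acc) := by
    intro acc d
    by_cases hg : egGrid (x + d.1, y + d.2) = true
    · rw [if_pos hg, if_neg]
      simp [egGrid] at hg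
      omega
    · rw [if_neg hg, if_pos]
      simp [egGrid] at hg
      omega
  have hfa := PySem.List.foldl_append_if (fun d => egGrid (x + d.1, y + d.2))
    (fun d => (x + d.1, y + d.2)) ([(-1, 0), (1, 0), (0, 1), (0, -1)] : List (Int × Int)) []
  rw [egNbrs, List.foldl_ext _ _ _ (fun acc d _ => h acc d), hfa]
  simp only [egDirs, List.filter_cons, List.filter_nil, List.map_cons, List.map_nil,
    List.nil_append, apply_ite (List.map fun (d : Int × Int) => (x + d.1, y + d.2))]
  norm_num
  rw [show x + -1 = x - 1 from by ring, show y + -1 = y - 1 from by ring]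

-- the inner for-loop of A, as a filter (the four candidate cells are pairwise distinct)
theorem egFoldSkip (blk : List (Int × Int)) (l : List (Int × Int)) (hl : l.Nodup) :
    ∀ (seen st0 : List (Int × Int)),
      l.foldl (fun (st : List (Int × Int) × List (Int × Int)) n =>
          if PySem.Set.contains blk n || PySem.Set.contains st.1 n then st
          else (PySem.Set.add st.1 n, st.2 ++ [n])) (seen, st0) =
        (seen ++ l.filter (fun n => !(PySem.Set.contains blk n) && !(PySem.Set.contains seen n)),
         st0 ++ l.filter (fun n => !(PySem.Set.contains blk n) && !(PySem.Set.contains seen n))) := by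
  induction l with
  | nil => simp
  | cons n l ih =>
    intro seen st0
    obtain ⟨hn, hl'⟩ := List.nodup_cons.mp hl
    by_cases hc : (PySem.Set.contains blk n || PySem.Set.contains seen n) = true
    · rw [List.foldl_cons, if_pos hc, ih hl' seen st0, List.filter_cons]
      have : (!(PySem.Set.contains blk n) && !(PySem.Set.contains seen n)) = false := by
        cases h1 : PySem.Set.contains blk n <;> cases h2 : PySem.Set.contains seen n <;>
          first | rfl | simp_all
      rw [this]
      simp
    · have h1 : PySem.Set.contains blk n = false := by
        cases h : PySem.Set.contains blk n <;> simp_all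
      have h2 : PySem.Set.contains seen n = false := by
        cases h : PySem.Set.contains seen n <;> simp_all
      rw [List.foldl_cons, if_neg hc]
      have hadd : PySem.Set.add seen n = seen ++ [n] := by
        simp [PySem.Set.add, PySem.Set.contains] at h2 ⊢
        simp [h2]
      rw [hadd, ih hl' (seen ++ [n]) (st0 ++ [n]), List.filter_cons]
      have hcond : (!(PySem.Set.contains blk n) && !(PySem.Set.contains seen n)) = true := by
        rw [h1, h2]
        rfl
      rw [hcond]
      have hfc : l.filter (fun m => !(PySem.Set.contains blk m) && !(PySem.Set.contains (seen ++ [n]) m)) =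
          l.filter (fun m => !(PySem.Set.contains blk m) && !(PySem.Set.contains seen m)) := by
        apply List.filter_congr
        intro m hm
        have hmn : m ≠ n := fun h => hn (h ▸ hm)
        simp [List.mem_append, hmn]
      rw [hfc]
      simp

-- the inner for-loop of B, as a filter
theorem egFoldAdd (blk : List (Int × Int)) (l : List (Int × Int)) (hl : l.Nodup) :
    ∀ (seen st0 : List (Int × Int)),
      l.foldl (fun (st : List (Int × Int) × List (Int × Int)) n =>
          if egGrid n && !(PySem.Set.contains blk n) && !(PySem.Set.contains st.1 n)
          then (PySem.Set.add st.1 n, st.2 ++ [n]) else st) (seen, st0) =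
        (seen ++ l.filter (egOK blk seen), st0 ++ l.filter (egOK blk seen)) := by
  induction l with
  | nil => simp
  | cons n l ih =>
    intro seen st0
    obtain ⟨hn, hl'⟩ := List.nodup_cons.mp hl
    by_cases hc : (egGrid n && !(PySem.Set.contains blk n) && !(PySem.Set.contains seen n)) = true
    · have h2 : PySem.Set.contains seen n = false := by
        cases h : PySem.Set.contains seen n <;> simp_all
      have hadd : PySem.Set.add seen n = seen ++ [n] := by
        simp [PySem.Set.add, PySem.Set.contains] at h2 ⊢
        simp [h2]
      rw [List.foldl_cons, if_pos hc, hadd, ih hl' (seen ++ [n]) (st0 ++ [n]), List.filter_cons]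
      have hcond : egOK blk seen n = true := hc
      rw [hcond]
      have hfc : l.filter (egOK blk (seen ++ [n])) = l.filter (egOK blk seen) := by
        apply List.filter_congr
        intro m hm
        have hmn : m ≠ n := fun h => hn (h ▸ hm)
        simp [egOK, List.mem_append, hmn]
      rw [hfc]
      simp
    · rw [List.foldl_cons, if_neg hc, ih hl' seen st0, List.filter_cons]
      have hcond : egOK blk seen n = false := by
        cases h : egOK blk seen n
        · rfl
        · exact absurd h hc
      rw [hcond]
      simp

-- A's filtered neighbour list, then the blocked/seen test, is exactly egNews
theorem egNewsA (blk seen : List (Int × Int)) (x y : Int) :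
    (egNbrs x y).filter (fun n => !(PySem.Set.contains blk n) && !(PySem.Set.contains seen n)) =
      egNews blk seen (x, y) := by
  rw [egNbrs_eq, List.filter_filter, egNews]
  apply List.filter_congr
  intro a _
  cases h1 : egGrid a <;> cases h2 : PySem.Set.contains blk a <;>
    cases h3 : PySem.Set.contains seen a <;> simp only [egOK, h1, h2, h3] <;> rfl

theorem egLoopA_eq (blk : List (Int × Int)) (L sx sy ex ey : Int) :
    ∀ (fuel : Nat) (seen stack : List (Int × Int)),
      egLoopA blk L sx sy ex ey fuel seen stack =
        egGen egPopLast blk L sx sy ex ey fuel seen stack := by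
  intro fuel
  induction fuel with
  | zero => intro seen stack; rfl
  | succ f ih =>
    intro seen stack
    rw [egLoopA, egGen]
    cases h : stack.getLast? with
    | none => simp [egPopLast, h]
    | some c =>
      obtain ⟨x, y⟩ := c
      simp only [egPopLast, h, Option.map_some]
      have hb : egBad L sx sy ex ey (x, y) = (!(egInBox x y sx sy L) || (x == ex && y == ey)) := rfl
      rw [hb]
      by_cases hc : (!(egInBox x y sx sy L) || (x == ex && y == ey)) = true
      · simp [hc]
      · simp only [eq_false_of_ne_true hc, Bool.false_eq_true, reduceIte]
        have hfold := egFoldSkip blk (egNbrs x y)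
          (by rw [egNbrs_eq]; exact (egDirs_nodup (x, y)).filter _) seen stack.dropLast
        rw [hfold, egNewsA blk seen x y]
        exact ih _ _

theorem egLoopB_eq (blk : List (Int × Int)) (L sx sy ex ey : Int) :
    ∀ (fuel : Nat) (seen queue : List (Int × Int)),
      egLoopB blk L sx sy ex ey fuel seen queue =
        egGen egPopHead blk L sx sy ex ey fuel seen queue := by
  intro fuel
  induction fuel with
  | zero => intro seen queue; rfl
  | succ f ih =>
    intro seen queue
    cases queue with
    | nil => rfl
    | cons c rest =>
      obtain ⟨x, y⟩ := c
      rw [egLoopB, egGen]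
      simp only [egPopHead]
      have hb : egBad L sx sy ex ey (x, y) =
          (decide (x < sx - L) || decide (x > sx + L) || decide (y < sy - L) ||
            decide (y > sy + L) || (x == ex && y == ey)) := by
        apply Bool.eq_iff_iff.mpr
        simp [egBad, egInBox]
        omega
      rw [hb]
      by_cases hc : (decide (x < sx - L) || decide (x > sx + L) || decide (y < sy - L) ||
          decide (y > sy + L) || (x == ex && y == ey)) = true
      · simp [hc]
      · simp only [eq_false_of_ne_true hc, Bool.false_eq_true, reduceIte]
        have hdirs : ([(x - 1, y), (x + 1, y), (x, y + 1), (x, y - 1)] : List (Int × Int)) =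
            egDirs (x, y) := rfl
        have hfold := egFoldAdd blk (egDirs (x, y)) (egDirs_nodup (x, y)) seen rest
        rw [hdirs, hfold]
        exact ih _ _

-- at a drained worklist every reachable cell has been seen and found non-bad
theorem egReach_closed (blk : List (Int × Int)) (L sx sy ex ey : Int)
    (seen : List (Int × Int)) (hstart : (sx, sy) ∈ seen)
    (hcl : ∀ c ∈ seen, egBad L sx sy ex ey c = false ∧
      ∀ n ∈ egDirs c, egGrid n = true → n ∉ blk → n ∈ seen) :
    ∀ c, EgReach blk L sx sy ex ey c → c ∈ seen ∧ egBad L sx sy ex ey c = false := by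
  intro c hr
  induction hr with
  | start => exact ⟨hstart, (hcl _ hstart).1⟩
  | step c n _ _ hdir hgrid hblk ih =>
    have hn : n ∈ seen := (hcl c ih.1).2 n hdir hgrid hblk
    exact ⟨hn, (hcl n hn).1⟩

theorem egLen_le_card (l : List (Int × Int)) (s : Finset (Int × Int))
    (h1 : l.Nodup) (h2 : ∀ x ∈ l, x ∈ s) : l.length ≤ s.card := by
  have := Finset.card_le_card (fun x hx => h2 x (List.mem_toFinset.mp hx))
  rwa [List.toFinset_card_of_nodup h1] at this

-- the master lemma: with the invariant and enough fuel, either pop discipline decides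
-- exactly "some reachable cell is bad"
theorem egGen_main (pop : List (Int × Int) → Option ((Int × Int) × List (Int × Int)))
    (hnil : ∀ w, pop w = none → w = [])
    (hpop : ∀ w c rest, pop w = some (c, rest) → w.Perm (c :: rest))
    (blk : List (Int × Int)) (L sx sy ex ey : Int) :
    ∀ (fuel : Nat) (seen work : List (Int × Int)),
      EgInv blk L sx sy ex ey seen work →
      egMeasure L sx sy seen work ≤ fuel →
      (egGen pop blk L sx sy ex ey fuel seen work = true ↔
        ∃ c, EgReach blk L sx sy ex ey c ∧ egBad L sx sy ex ey c = true) := by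
  intro fuel
  induction fuel with
  | zero =>
    intro seen work _ hm
    exact absurd hm (by simp [egMeasure])
  | succ f ih =>
    intro seen work hinv hm
    obtain ⟨hnd, hws, hreach, hproc, hstart, hbox⟩ := hinv
    rw [egGen]
    cases hp : pop work with
    | none =>
      have hw : work = [] := hnil _ hp
      subst hw
      simp only [Bool.false_eq_true, false_iff]
      rintro ⟨c, hc, hbad⟩
      have := egReach_closed blk L sx sy ex ey seen hstart
        (fun c hc => hproc c hc (by simp)) c hc
      rw [this.2] at hbad
      exact absurd hbad (by simp)
    | some pr =>
      obtain ⟨c, rest⟩ := pr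
      have hperm := hpop _ _ _ hp
      have hcw : c ∈ work := hperm.mem_iff.mpr (List.mem_cons_self ..)
      have hcseen : c ∈ seen := hws c hcw
      have hcreach : EgReach blk L sx sy ex ey c := hreach c hcseen
      by_cases hbad : egBad L sx sy ex ey c = true
      · simp only [hbad, if_true, true_iff]
        exact ⟨c, hcreach, hbad⟩
      · have hbadf : egBad L sx sy ex ey c = false := eq_false_of_ne_true hbad
        simp only [hbadf, Bool.false_eq_true, reduceIte]
        set news := egNews blk seen c with hnews
        have hmemnews : ∀ n, n ∈ news ↔
            n ∈ egDirs c ∧ egGrid n = true ∧ n ∉ blk ∧ n ∉ seen := egMem_news blk seen c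
        have hfresh : ∀ n ∈ news, n ∉ seen := fun n hn => ((hmemnews n).mp hn).2.2.2
        have hinbox : egInBox c.1 c.2 sx sy L = true := by
          cases h : egInBox c.1 c.2 sx sy L
          · simp [egBad, h] at hbadf
          · rfl
        have hnewsbox : ∀ n ∈ news, n ∈ egBox L sx sy := by
          intro n hn
          obtain ⟨hd, _, _, _⟩ := (hmemnews n).mp hn
          simp only [egInBox, Bool.and_eq_true, decide_eq_true_eq] at hinbox
          simp only [egDirs, List.mem_cons, List.not_mem_nil, or_false] at hd
          simp only [egBox, Finset.mem_product, Finset.mem_Icc]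
          rcases hd with h | h | h | h <;> rw [h] <;> constructor <;> constructor <;> omega
        have hnd' : (seen ++ news).Nodup :=
          hnd.append (egNews_nodup blk seen c) (fun a ha hb => hfresh a hb ha)
        have hinv' : EgInv blk L sx sy ex ey (seen ++ news) (rest ++ news) := by
          refine ⟨hnd', ?_, ?_, ?_, List.mem_append_left _ hstart, ?_⟩
          · intro d hd
            rcases List.mem_append.mp hd with h | h
            · exact List.mem_append_left _ (hws d (hperm.mem_iff.mpr (List.mem_cons_of_mem _ h)))
            · exact List.mem_append_right _ h
          · intro d hd
            rcases List.mem_append.mp hd with h | h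
            · exact hreach d h
            · obtain ⟨hdir, hgrid, hblk, _⟩ := (hmemnews d).mp h
              exact EgReach.step c d hcreach hbadf hdir hgrid hblk
          · intro d hd hdnot
            have hdrest : d ∉ rest := fun h => hdnot (List.mem_append_left _ h)
            have hdnews : d ∉ news := fun h => hdnot (List.mem_append_right _ h)
            rcases List.mem_append.mp hd with hds | hdn
            · by_cases hdc : d = c
              · subst hdc
                refine ⟨hbadf, ?_⟩
                intro n hdir hgrid hblk
                by_cases hns : n ∈ seen
                · exact List.mem_append_left _ hns
                · exact List.mem_append_right _ ((hmemnews n).mpr ⟨hdir, hgrid, hblk, hns⟩)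
              · have hdw : d ∉ work := by
                  intro h
                  rcases List.mem_cons.mp (hperm.mem_iff.mp h) with h' | h'
                  · exact hdc h'
                  · exact hdrest h'
                obtain ⟨hb, hcl⟩ := hproc d hds hdw
                exact ⟨hb, fun n hdir hgrid hblk => List.mem_append_left _ (hcl n hdir hgrid hblk)⟩
            · exact absurd hdn hdnews
          · intro d hd
            rcases List.mem_append.mp hd with h | h
            · exact hbox d h
            · exact hnewsbox d h
        apply ih _ _ hinv'
        -- fuel accounting
        have hlen : (seen ++ news).length ≤ (egBox L sx sy).card :=
          egLen_le_card _ _ hnd' (fun x hx => hinv'.2.2.2.2.2 x hx)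
        have hwl : work.length = rest.length + 1 := by
          have := hperm.length_eq
          simpa using this
        simp only [egMeasure, List.length_append] at hm hlen ⊢
        omega

-- initial state facts, and the two is_blocked functions agree
theorem egCard_box (L sx sy : Int) (hL : 0 ≤ L) :
    (egBox L sx sy).card = (2 * L.toNat + 3) ^ 2 := by
  have h1 : (sx + (L + 1) + 1 - (sx - (L + 1))).toNat = 2 * L.toNat + 3 := by omega
  have h2 : (sy + (L + 1) + 1 - (sy - (L + 1))).toNat = 2 * L.toNat + 3 := by omega
  rw [egBox, Finset.card_product, Int.card_Icc, Int.card_Icc, h1, h2]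
  ring

theorem egInit_inv (blk : List (Int × Int)) (L sx sy ex ey : Int) (hL : 0 ≤ L) :
    EgInv blk L sx sy ex ey [(sx, sy)] [(sx, sy)] := by
  refine ⟨List.nodup_singleton _, ?_, ?_, ?_, List.mem_singleton_self _, ?_⟩
  · intro c hc; exact hc
  · intro c hc
    rw [List.mem_singleton.mp hc]
    exact EgReach.start
  · intro c hc hnc
    exact absurd hc hnc
  · intro c hc
    rw [List.mem_singleton.mp hc]
    simp only [egBox, Finset.mem_product, Finset.mem_Icc]
    omega

theorem egGen_spec (pop : List (Int × Int) → Option ((Int × Int) × List (Int × Int)))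
    (hnil : ∀ w, pop w = none → w = [])
    (hpop : ∀ w c rest, pop w = some (c, rest) → w.Perm (c :: rest))
    (blk : List (Int × Int)) (L sx sy ex ey : Int) (hL : 0 ≤ L)
    (hfuel : egMeasure L sx sy [(sx, sy)] [(sx, sy)] ≤ 5 * (2 * L.toNat + 3) ^ 2 + 5) :
    (egGen pop blk L sx sy ex ey (5 * (2 * L.toNat + 3) ^ 2 + 5) [(sx, sy)] [(sx, sy)] = true ↔
      ∃ c, EgReach blk L sx sy ex ey c ∧ egBad L sx sy ex ey c = true) :=
  egGen_main pop hnil hpop blk L sx sy ex ey _ _ _ (egInit_inv blk L sx sy ex ey hL) hfuel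

theorem egPopLast_none : ∀ w, egPopLast w = none → w = [] := by
  intro w h
  cases w with
  | nil => rfl
  | cons a l =>
    simp [egPopLast] at h

theorem egPopLast_some : ∀ w c rest, egPopLast w = some (c, rest) → w.Perm (c :: rest) := by
  intro w c rest h
  simp only [egPopLast, Option.map_eq_some_iff] at h
  obtain ⟨a, ha, heq⟩ := h
  obtain ⟨l', rfl⟩ := List.getLast?_eq_some_iff.mp ha
  obtain ⟨rfl, hr⟩ := Prod.mk.injEq .. ▸ heq
  rw [← hr]
  simp only [List.dropLast_concat]
  exact List.perm_append_singleton a l'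

theorem egPopHead_none : ∀ w, egPopHead w = none → w = [] := by
  intro w h
  cases w with
  | nil => rfl
  | cons a l => simp [egPopHead] at h

theorem egPopHead_some : ∀ w c rest, egPopHead w = some (c, rest) → w.Perm (c :: rest) := by
  intro w c rest h
  cases w with
  | nil => simp [egPopHead] at h
  | cons a l =>
    simp only [egPopHead, Option.some_inj, Prod.mk.injEq] at h
    rw [h.1, h.2]

theorem egMeasure_init (L sx sy : Int) (hL : 0 ≤ L) :
    egMeasure L sx sy [(sx, sy)] [(sx, sy)] ≤ 5 * (2 * L.toNat + 3) ^ 2 + 5 := by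
  have hc := egCard_box L sx sy hL
  simp only [egMeasure, List.length_singleton]
  omega

theorem egIsBlocked_agree (blk : List (Int × Int)) (L sx sy ex ey : Int) (hL : 0 ≤ L) :
    egIsBlockedA blk L sx sy ex ey = egEscapesB blk L sx sy ex ey := by
  have hseenA : PySem.Set.add PySem.Set.empty ((sx : Int), (sy : Int)) = [(sx, sy)] := rfl
  have hseenB : PySem.Set.ofList [((sx : Int), (sy : Int))] = [(sx, sy)] := rfl
  have hA := egGen_spec egPopLast egPopLast_none egPopLast_some blk L sx sy ex ey hL
    (egMeasure_init L sx sy hL)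
  have hB := egGen_spec egPopHead egPopHead_none egPopHead_some blk L sx sy ex ey hL
    (egMeasure_init L sx sy hL)
  rw [egIsBlockedA, egEscapesB, hseenA, hseenB, egFuelA, egFuelB,
    egLoopA_eq, egLoopB_eq]
  exact Bool.eq_iff_iff.mpr (hA.trans hB.symm)

theorem isEscapePossible_spec' (blocked : List (List Int)) (source : List Int) (target : List Int) :
    isEscapePossible blocked source target = isEscapePossible_alt blocked source target := by
  have hblk : blocked.foldl
      (fun (s : PySem.Set (Int × Int)) b =>
        PySem.Set.add s (PySem.List.pyGetD b 0 0, PySem.List.pyGetD b 1 0)) PySem.Set.empty =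
      PySem.Set.ofList (blocked.map (fun x => (PySem.List.pyGetD x 0 0, PySem.List.pyGetD x 1 0))) := by
    rw [PySem.Set.ofList_eq_foldl, List.foldl_map]
    rfl
  simp only [isEscapePossible, isEscapePossible_alt, hblk]
  rw [egIsBlocked_agree _ _ _ _ _ _ (Int.natCast_nonneg _),
    egIsBlocked_agree _ _ _ _ _ _ (Int.natCast_nonneg _)]

-- ===== VERDICT (by name: the statement is the Claim_ definition above) =====
theorem isEscapePossible_spec : Claim_equal_isEscapePossible := by
  intro blocked source target _ _
  exact isEscapePossible_spec' blocked source target
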